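-- pv_equiv track=rewrite | github.com/alamdari/EVSim | shortest_paths_precomputation.py | find_min_max_init_charge
-- ===== SOURCE A (Python) =====
-- import math
--
-- def find_min_max_init_charge(cons_seq, batt_cap):
--     cons_seq = [math.ceil(c) for c in cons_seq]
--     init_charge = 0
--     charge_so_far = init_charge
--
--     max_sum_subarray = -batt_cap - 1
--     max_sum_edning_here = 0
--
--     prefix_sum = 0
--     min_prefix_sum = batt_cap
--     for i in range(0, len(cons_seq)):
--         # for max_init_charge: find the minimum amount of prefix sum
--         prefix_sum = prefix_sum + cons_seq[i]
--         if prefix_sum < min_prefix_sum: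
--             min_prefix_sum = prefix_sum
--         # find subarray with max sum ending at i
--         max_sum_edning_here = max(max_sum_edning_here + cons_seq[i], cons_seq[i])
--         if max_sum_subarray < max_sum_edning_here:
--             max_sum_subarray = max_sum_edning_here
--
--         # EV can not follow a part of the route (max subarray) with the sum of
--         # consecutive consumptions that is larger than the battery cap. Thus return -1.
--         if max_sum_subarray > batt_cap:
--             return -1, -1
--
--         # 3 -6 2 -2 4 3
--
--         # -3 5 -1 -4 1 ==> min charge = 2   cap = 7
--
--         # charge at this stop
--         charge = charge_so_far - cons_seq[i]
--         if charge < 0: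
--             init_charge += -1 * charge
--
--             # if at some point we need to have init_charge larger than the cap,
--             # the path is not admissible.
--             if init_charge > batt_cap:
--                 return -2, -2
--             charge_so_far = 0
--         elif charge > batt_cap:
--             charge_so_far = batt_cap
--         else:
--             charge_so_far = charge
--     max_init_charge = batt_cap + min_prefix_sum if min_prefix_sum <= 0 else batt_cap
--     return init_charge, max_init_charge
-- ===== SOURCE B (Python) =====
-- import math
--
-- def find_min_max_init_charge(cons_seq, batt_cap):
--     xs = [math.ceil(c) for c in cons_seq]
--
--     # pass 1: Kadane -- first index where the running max-subarray sum exceeds the cap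
--     i1 = None
--     best = -batt_cap - 1
--     here = 0
--     for i, x in enumerate(xs):
--         here = max(here + x, x)
--         if here > best:
--             best = here
--         if best > batt_cap:
--             i1 = i
--             break
--
--     # pass 2: clamped charge simulation -- accumulated deficit and first index it exceeds the cap
--     i2 = None
--     init_charge = 0
--     charge_so_far = 0
--     for i, x in enumerate(xs):
--         charge = charge_so_far - x
--         if charge < 0:
--             init_charge += -charge
--             if init_charge > batt_cap:
--                 i2 = i
--                 break
--             charge_so_far = 0
--         else:
--             charge_so_far = min(charge, batt_cap)
--
--     # pass 3: minimum prefix sum (capped at batt_cap)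
--     min_prefix = batt_cap
--     s = 0
--     for x in xs:
--         s += x
--         if s < min_prefix:
--             min_prefix = s
--
--     if i1 is not None and (i2 is None or i1 <= i2):
--         return -1, -1
--     if i2 is not None:
--         return -2, -2
--     return init_charge, min(batt_cap + min_prefix, batt_cap)
-- ===== Notes on version B (the rewrite author's own statement) =====
-- stated objective: alternative
-- what changed: A's single fused loop with two early returns is decomposed into three independent passes (Kadane with first over-cap index, clamped charge simulation with first over-cap index, min prefix sum) combined at the end by comparing the two break indices.
import Mathlib
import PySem

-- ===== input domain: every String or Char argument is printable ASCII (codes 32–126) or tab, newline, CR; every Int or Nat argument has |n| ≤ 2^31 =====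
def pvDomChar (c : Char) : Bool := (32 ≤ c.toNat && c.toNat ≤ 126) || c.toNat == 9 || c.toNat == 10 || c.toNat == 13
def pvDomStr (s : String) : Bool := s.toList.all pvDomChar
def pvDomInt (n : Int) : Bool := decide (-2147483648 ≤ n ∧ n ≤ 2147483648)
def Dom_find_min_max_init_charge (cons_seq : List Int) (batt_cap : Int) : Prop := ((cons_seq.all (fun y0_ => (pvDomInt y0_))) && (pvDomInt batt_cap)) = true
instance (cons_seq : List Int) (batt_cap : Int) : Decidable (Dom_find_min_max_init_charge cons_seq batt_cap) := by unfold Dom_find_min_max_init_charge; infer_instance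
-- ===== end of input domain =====

-- B recomputes the three quantities of A's single fused loop (Kadane max-subarray cutoff,
-- clamped charge simulation, min prefix sum) in separate passes and combines them at the end;
-- objective: alternative decomposition, same O(n) cost.
-- (math.ceil on the Int elements is the identity, so both ports omit it.)

-- ===== PORT A =====
-- A's single loop over range(len(cons_seq)), all variables carried as state;
-- early 'return' becomes returning immediately from the recursion.
def aGo (cap : Int) : List Int → Int → Int → Int → Int → Int → Int → Int × Int
  | [], init, _cs, _mss, _mseh, _ps, mps =>
      (init, if mps ≤ 0 then cap + mps else cap)
  | c :: rest, init, cs, mss, mseh, ps, mps =>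
      let ps' := ps + c
      let mps' := if ps' < mps then ps' else mps
      let mseh' := max (mseh + c) c
      let mss' := if mss < mseh' then mseh' else mss
      if mss' > cap then (-1, -1)
      else if cs - c < 0 then
        (if init + (-1) * (cs - c) > cap then (-2, -2)
         else aGo cap rest (init + (-1) * (cs - c)) 0 mss' mseh' ps' mps')
      else if cs - c > cap then aGo cap rest init cap mss' mseh' ps' mps'
      else aGo cap rest init (cs - c) mss' mseh' ps' mps'

def find_min_max_init_charge (cons_seq : List Int) (batt_cap : Int) : Int × Int :=
  aGo batt_cap cons_seq 0 0 (-batt_cap - 1) 0 0 batt_cap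

-- ===== PORT B =====
-- pass 1: Kadane; first index where the running max-subarray sum exceeds the cap
def bKad (cap : Int) : List Int → Nat → Int → Int → Option Nat
  | [], _, _, _ => none
  | x :: rest, i, best, here =>
      let here' := max (here + x) x
      let best' := if here' > best then here' else best
      if best' > cap then some i else bKad cap rest (i + 1) best' here'

-- pass 2: clamped charge simulation; accumulated deficit and first index it exceeds the cap
def bSim (cap : Int) : List Int → Nat → Int → Int → Option Nat × Int
  | [], _, init, _ => (none, init)
  | x :: rest, i, init, cs =>
      if cs - x < 0 then
        (if init + -(cs - x) > cap then (some i, init + -(cs - x))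
         else bSim cap rest (i + 1) (init + -(cs - x)) 0)
      else bSim cap rest (i + 1) init (min (cs - x) cap)

-- pass 3: minimum prefix sum (starting from batt_cap, as in B's Python)
def bMps : List Int → Int → Int → Int
  | [], _, mps => mps
  | x :: rest, s, mps => bMps rest (s + x) (if s + x < mps then s + x else mps)

-- B's final if-chain combining the two break indices
def bCombine (i1 i2 : Option Nat) (ok : Int × Int) : Int × Int :=
  match i1, i2 with
  | some _, none => (-1, -1)
  | some a, some b => if a ≤ b then (-1, -1) else (-2, -2)
  | none, some _ => (-2, -2)
  | none, none => ok

def find_min_max_init_charge_alt (cons_seq : List Int) (batt_cap : Int) : Int × Int :=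
  let i1 := bKad batt_cap cons_seq 0 (-batt_cap - 1) 0
  let p := bSim batt_cap cons_seq 0 0 0
  let mps := bMps cons_seq 0 batt_cap
  bCombine i1 p.1 (p.2, min (batt_cap + mps) batt_cap)

-- ===== PRECONDITION & SPEC =====
def Spec_find_min_max_init_charge (cons_seq : List Int) (batt_cap : Int) (out : Int × Int) : Prop := out = find_min_max_init_charge_alt cons_seq batt_cap
instance (cons_seq : List Int) (batt_cap : Int) (out : Int × Int) : Decidable (Spec_find_min_max_init_charge cons_seq batt_cap out) := by unfold Spec_find_min_max_init_charge; infer_instance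

-- ===== CLAIM (what is proved, stated in full; the proofs are below) =====
def Claim_equal_find_min_max_init_charge : Prop := ∀ (cons_seq : List Int) (batt_cap : Int), Dom_find_min_max_init_charge cons_seq batt_cap → Spec_find_min_max_init_charge cons_seq batt_cap (find_min_max_init_charge cons_seq batt_cap)

-- ===== LEMMAS AND PROOFS =====

lemma bKad_ge (cap : Int) : ∀ (xs : List Int) (i : Nat) (best here : Int) (j : Nat),
    bKad cap xs i best here = some j → i ≤ j := by
  intro xs
  induction xs with
  | nil => intro i best here j h; simp [bKad] at h
  | cons x rest ih =>
      intro i best here j h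
      simp only [bKad] at h
      by_cases hb : (if max (here + x) x > best then max (here + x) x else best) > cap
      · rw [if_pos hb] at h; exact (Option.some.inj h) ▸ le_refl i
      · rw [if_neg hb] at h; have := ih (i + 1) _ _ j h; omega

lemma bSim_ge (cap : Int) : ∀ (xs : List Int) (i : Nat) (init cs : Int) (j : Nat),
    (bSim cap xs i init cs).1 = some j → i ≤ j := by
  intro xs
  induction xs with
  | nil => intro i init cs j h; simp [bSim] at h
  | cons x rest ih =>
      intro i init cs j h
      simp only [bSim] at h
      by_cases hc : cs - x < 0
      · rw [if_pos hc] at h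
        by_cases hi : init + -(cs - x) > cap
        · rw [if_pos hi] at h; simp at h; omega
        · rw [if_neg hi] at h; have := ih (i + 1) _ _ j h; omega
      · rw [if_neg hc] at h; have := ih (i + 1) _ _ j h; omega

lemma aGo_eq_combine (cap : Int) : ∀ (xs : List Int) (i : Nat) (init cs mss mseh ps mps : Int),
    aGo cap xs init cs mss mseh ps mps =
      bCombine (bKad cap xs i mss mseh) (bSim cap xs i init cs).1
        ((bSim cap xs i init cs).2, min (cap + bMps xs ps mps) cap) := by
  intro xs
  induction xs with
  | nil =>
      intro i init cs mss mseh ps mps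
      simp only [aGo, bKad, bSim, bMps, bCombine, Prod.mk.injEq]
      exact ⟨trivial, by split_ifs <;> omega⟩
  | cons x rest ih =>
      intro i init cs mss mseh ps mps
      simp only [aGo, bKad, bSim, bMps, gt_iff_lt]
      have he : init + (-1) * (cs - x) = init + -(cs - x) := by ring
      rw [he]
      by_cases hm : cap < (if mss < max (mseh + x) x then max (mseh + x) x else mss)
      · -- A returns (-1,-1); Kadane pass breaks at index i
        simp only [if_pos hm]
        by_cases hc : cs - x < 0
        · simp only [if_pos hc]
          by_cases hi : cap < init + -(cs - x)
          · simp only [if_pos hi, bCombine, le_refl, if_pos]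
          · simp only [if_neg hi]
            rcases hj : (bSim cap rest (i + 1) (init + -(cs - x)) 0).1 with _ | j
            · simp [bCombine]
            · have := bSim_ge cap rest (i + 1) _ _ j hj
              simp only [bCombine]
              rw [if_pos (by omega)]
        · simp only [if_neg hc]
          rcases hj : (bSim cap rest (i + 1) init (min (cs - x) cap)).1 with _ | j
          · simp [bCombine]
          · have := bSim_ge cap rest (i + 1) _ _ j hj
            simp only [bCombine]
            rw [if_pos (by omega)]
      · simp only [if_neg hm]
        by_cases hc : cs - x < 0
        · simp only [if_pos hc]
          by_cases hi : cap < init + -(cs - x)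
          · -- A returns (-2,-2); simulation pass breaks at index i
            simp only [if_pos hi]
            rcases hj : bKad cap rest (i + 1)
                (if mss < max (mseh + x) x then max (mseh + x) x else mss) (max (mseh + x) x)
                with _ | j
            · simp [bCombine]
            · have := bKad_ge cap rest (i + 1) _ _ j hj
              simp only [bCombine]
              rw [if_neg (by omega)]
          · simp only [if_neg hi]
            exact ih (i + 1) _ _ _ _ _ _
        · simp only [if_neg hc]
          by_cases hb : cap < cs - x
          · simp only [if_pos hb]
            have hmin : min (cs - x) cap = cap := by omega
            rw [hmin]
            exact ih (i + 1) _ _ _ _ _ _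
          · simp only [if_neg hb]
            have hmin : min (cs - x) cap = cs - x := by omega
            rw [hmin]
            exact ih (i + 1) _ _ _ _ _ _

-- ===== VERDICT (by name: the statement is the Claim_ definition above) =====
theorem find_min_max_init_charge_spec : Claim_equal_find_min_max_init_charge := by
  intro xs cap _
  unfold Spec_find_min_max_init_charge find_min_max_init_charge find_min_max_init_charge_alt
  exact aGo_eq_combine cap xs 0 0 0 (-cap - 1) 0 0 cap
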